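-- pv_equiv track=rewrite | github.com/mkorman90/regipy | regipy/plugins/system/pending_file_rename.py | _parse_operations
-- ===== SOURCE A (Python) =====
-- def _parse_operations(data, value_name: str) -> list:
--     """Parse pending file rename operations"""
--     operations = []
--
--     if not data:
--         return operations
--
--     # Data is REG_MULTI_SZ - list of strings
--     if isinstance(data, list):
--         items = data
--     elif isinstance(data, str):
--         items = [data]
--     else:
--         return operations
--
--     # Operations come in pairs: source, destination (or empty for delete)
--     i = 0
--     while i < len(items):
--         source = items[i] if i < len(items) else None
--         destination = items[i + 1] if i + 1 < len(items) else None
--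
--         if source:
--             # Remove NT path prefix if present
--             if source.startswith("\\??\\"):
--                 source = source[4:]
--
--             op = {
--                 "source": source,
--                 "value_name": value_name,
--             }
--
--             if destination:
--                 if destination.startswith("\\??\\"):
--                     destination = destination[4:]
--                 op["destination"] = destination
--                 op["operation"] = "rename"
--             else:
--                 op["operation"] = "delete"
--
--             operations.append(op)
--
--         i += 2
--
--     return operations
-- ===== SOURCE B (Python) =====
-- def _parse_operations(data, value_name: str) -> list:
--     """Parse pending file rename operations (single-pass source/destination state machine)"""
--     if not data:
--         return []
--     if isinstance(data, list):
--         items = data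
--     elif isinstance(data, str):
--         items = [data]
--     else:
--         return []
--
--     operations = []
--     pending = None
--     expecting_dest = False
--     for item in items:
--         if expecting_dest:
--             if pending:
--                 operations.append(_make_op(pending, item, value_name))
--             expecting_dest = False
--         else:
--             pending = item
--             expecting_dest = True
--     if expecting_dest and pending:
--         operations.append(_make_op(pending, None, value_name))
--     return operations
--
--
-- def _strip_nt_prefix(path):
--     return path[4:] if path.startswith("\\??\\") else path
--
--
-- def _make_op(source, destination, value_name):
--     op = {"source": _strip_nt_prefix(source), "value_name": value_name}
--     if destination:
--         op["destination"] = _strip_nt_prefix(destination)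
--         op["operation"] = "rename"
--     else:
--         op["operation"] = "delete"
--     return op
-- ===== Notes on version B (the rewrite author's own statement) =====
-- stated objective: alternative
-- what changed: Replaces A's index-arithmetic while loop (i, items[i], items[i+1], i += 2) with a single direct pass over the elements driven by a pending-source/expecting-destination state machine plus a shared _make_op/_strip_nt_prefix helper pair, finishing an odd trailing source as a delete after the loop.
import Mathlib
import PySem

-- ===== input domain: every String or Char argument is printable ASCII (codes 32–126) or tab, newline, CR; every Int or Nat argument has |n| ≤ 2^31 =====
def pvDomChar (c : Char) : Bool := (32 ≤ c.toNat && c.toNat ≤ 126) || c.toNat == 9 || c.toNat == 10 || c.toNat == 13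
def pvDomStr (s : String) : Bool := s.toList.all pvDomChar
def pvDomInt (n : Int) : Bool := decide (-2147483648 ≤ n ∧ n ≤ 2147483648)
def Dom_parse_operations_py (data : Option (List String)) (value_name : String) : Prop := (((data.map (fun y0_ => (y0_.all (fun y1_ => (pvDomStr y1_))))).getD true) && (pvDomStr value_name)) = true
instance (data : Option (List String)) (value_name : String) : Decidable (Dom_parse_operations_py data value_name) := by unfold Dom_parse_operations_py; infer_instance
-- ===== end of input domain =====

-- B replaces A's index-stepping while loop by a single direct pass with a pending/expecting state machine; same cost, different decomposition.
-- (Python dicts here have the distinct literal keys "source"/"value_name"/"destination"/"operation", so key insertion is ported as association-list append.)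

-- ===== PORT A =====
-- A's while loop: i steps by 2, source = items[i] (guarded), destination = items[i+1] (guarded).
def parse_operations_loop (items : List String) (value_name : String) (i : Nat) : List (List (String × String)) :=
  if _h : i < items.length then
    let source : Option String := if i < items.length then PySem.List.pyGet? items (i : Int) else none
    let destination : Option String := if i + 1 < items.length then PySem.List.pyGet? items ((i : Int) + 1) else none
    let ops : List (List (String × String)) :=
      match source with
      | none => []
      | some s =>
        if s ≠ "" then
          let s := if PySem.Str.startswith s "\\??\\" then PySem.Str.slice s (some 4) none else s
          let op : List (String × String) := [("source", s), ("value_name", value_name)]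
          match destination with
          | some d =>
            if d ≠ "" then
              let d := if PySem.Str.startswith d "\\??\\" then PySem.Str.slice d (some 4) none else d
              [op ++ [("destination", d), ("operation", "rename")]]
            else [op ++ [("operation", "delete")]]
          | none => [op ++ [("operation", "delete")]]
        else []
    ops ++ parse_operations_loop items value_name (i + 2)
  else []
termination_by items.length - i
decreasing_by omega

def parse_operations_py (data : Option (List String)) (value_name : String) : List (List (String × String)) :=
  match data with
  | none => []
  | some items =>
    if items.isEmpty then []
    else parse_operations_loop items value_name 0

-- ===== PORT B =====
def pvStripNT (path : String) : String :=
  if PySem.Str.startswith path "\\??\\" then PySem.Str.slice path (some 4) none else path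

def pvMakeOp (source : String) (destination : Option String) (value_name : String) : List (String × String) :=
  [("source", pvStripNT source), ("value_name", value_name)] ++
    (match destination with
     | some d =>
       if d ≠ "" then [("destination", pvStripNT d), ("operation", "rename")]
       else [("operation", "delete")]
     | none => [("operation", "delete")])

-- one fold step of B's for-loop; state = (operations, pending, expecting_dest)
def pvStep (value_name : String) (st : List (List (String × String)) × Option String × Bool) (item : String) :
    List (List (String × String)) × Option String × Bool :=
  match st with
  | (ops, pending, expecting) =>
    if expecting then
      ((match pending with
        | some s => if s ≠ "" then ops ++ [pvMakeOp s (some item) value_name] else ops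
        | none => ops), pending, false)
    else (ops, some item, true)

-- B's epilogue after the loop: 'if expecting_dest and pending: append delete op'
def pvFinish (value_name : String) (st : List (List (String × String)) × Option String × Bool) : List (List (String × String)) :=
  match st with
  | (ops, pending, expecting) =>
    if expecting then
      match pending with
      | some s => if s ≠ "" then ops ++ [pvMakeOp s none value_name] else ops
      | none => ops
    else ops

def parse_operations_py_alt (data : Option (List String)) (value_name : String) : List (List (String × String)) :=
  match data with
  | none => []
  | some items =>
    if items.isEmpty then []
    else pvFinish value_name (items.foldl (pvStep value_name) ([], none, false))

-- ===== PRECONDITION & SPEC =====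
def Spec_parse_operations_py (data : Option (List String)) (value_name : String) (out : List (List (String × String))) : Prop := out = parse_operations_py_alt data value_name
instance (data : Option (List String)) (value_name : String) (out : List (List (String × String))) : Decidable (Spec_parse_operations_py data value_name out) := by unfold Spec_parse_operations_py; infer_instance

-- ===== CLAIM (what is proved, stated in full; the proofs are below) =====
def Claim_equal_parse_operations_py : Prop := ∀ (data : Option (List String)) (value_name : String), Dom_parse_operations_py data value_name → Spec_parse_operations_py data value_name (parse_operations_py data value_name)

-- ===== LEMMAS AND PROOFS =====

-- Main invariant: running B's fold over the suffix items.drop i (with expecting = false)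
-- and finishing produces the accumulated ops followed by A's loop from index i.
lemma pv_main (value_name : String) : ∀ (n : Nat) (items : List String) (i : Nat)
    (ops : List (List (String × String))) (p : Option String),
    items.length ≤ i + n →
    pvFinish value_name ((items.drop i).foldl (pvStep value_name) (ops, p, false)) =
      ops ++ parse_operations_loop items value_name i := by
  intro n
  induction n with
  | zero =>
    intro items i ops p hle
    have h : ¬ i < items.length := by omega
    rw [List.drop_eq_nil_of_le (by omega)]
    rw [parse_operations_loop]
    simp [pvFinish, h]
  | succ n ih =>
    intro items i ops p hle
    by_cases h : i < items.length
    · have hx : items.drop i = items[i] :: items.drop (i + 1) := List.drop_eq_getElem_cons h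
      rw [parse_operations_loop]
      simp only [h, dif_pos, if_pos]
      by_cases h1 : i + 1 < items.length
      · have hy : items.drop (i + 1) = items[i + 1] :: items.drop (i + 2) := List.drop_eq_getElem_cons h1
        rw [hx, hy]
        simp only [List.foldl_cons]
        have hs1 : pvStep value_name (ops, p, false) items[i] = (ops, some items[i], true) := by
          simp [pvStep]
        rw [hs1]
        have hs2 : pvStep value_name (ops, some items[i], true) items[i + 1] =
            ((if items[i] ≠ "" then ops ++ [pvMakeOp items[i] (some items[i + 1]) value_name] else ops),
              some items[i], false) := by
          simp [pvStep]
        rw [hs2]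
        rw [ih items (i + 2) _ _ (by omega)]
        have gi : PySem.List.pyGet? items ((i : Nat) : Int) = some items[i] := by
          simp [h]
        have gi1 : PySem.List.pyGet? items ((i : Int) + 1) = some items[i + 1] := by
          have hc : ((i : Int) + 1) = (((i + 1 : Nat)) : Int) := by push_cast; ring
          rw [hc, PySem.List.pyGet?_natCast]
          exact List.getElem?_eq_getElem h1
        simp only [h1, if_pos, gi, gi1]
        by_cases hne : items[i] = ""
        · simp [hne]
        · by_cases hd : items[i + 1] = "" <;>
            simp [hne, hd, pvMakeOp, pvStripNT, List.append_assoc]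
      · have hy : items.drop (i + 1) = [] := List.drop_eq_nil_of_le (by omega)
        rw [hx, hy]
        simp only [List.foldl_cons, List.foldl_nil]
        have hs1 : pvStep value_name (ops, p, false) items[i] = (ops, some items[i], true) := by
          simp [pvStep]
        rw [hs1]
        have gi : PySem.List.pyGet? items ((i : Nat) : Int) = some items[i] := by
          simp [h]
        simp only [h1, gi]
        rw [parse_operations_loop]
        have h2 : ¬ i + 2 < items.length := by omega
        simp only [h2, dif_neg, not_false_iff]
        by_cases hne : items[i] = ""
        · simp [pvFinish, hne]
        · simp [pvFinish, hne, pvMakeOp, pvStripNT]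
    · have h0 : ¬ i < items.length := h
      rw [List.drop_eq_nil_of_le (by omega)]
      rw [parse_operations_loop]
      simp [pvFinish, h0]

theorem parse_operations_py_spec : Claim_equal_parse_operations_py := by
  intro data value_name _
  unfold Spec_parse_operations_py parse_operations_py parse_operations_py_alt
  match data with
  | none => rfl
  | some items =>
    by_cases h : items.isEmpty
    · simp [h]
    · simp only [h]
      have := pv_main value_name items.length items 0 [] none (by omega)
      simpa using this.symm
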